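/- GENERATED by farm/mkstatement.py from design/units.tsv (unit `realloc`) and the Specs of ProgX/Base/Spec/*.lean — do not edit.
   THE STATEMENT of the proof unit `realloc`: the function `realloc` (58 instructions) satisfies its contract,
   given the contracts of its callees. What the names mean: ProgX/Base/Spec/Basic.lean. The theorem to prove:
   `theorem realloc_ok : ProgX.Base.Spec.realloc.Statement`. -/
import ProgX.Base.Spec.Heap
import ProgX.Base.Spec.Libc
import ProgX.Base.Spec.Runtime
namespace ProgX.Base.Spec.realloc
open X86 X86.User Asan

/-- The statement of unit `realloc`. -/
def Statement : Prop :=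
  ∀ (Lay : Layout) (_hLay : Lay.hi = 0x1000000) (μ : Microarch) (_hμ : UserX.MicroOK μ) (u₀ : State)
    (_hcode : HasCodeNat Lay u₀ ProgX.Base.L.realloc.entry ProgX.Base.Code.code_realloc.nat ProgX.Base.L.realloc.size)
    (_h_heap_live_size : ∀ (H : Heap) (n : Nat), Calls Lay μ ProgX.Base.WayInv (ProgX.Base.conv u₀) ProgX.Base.L.heap_live_size.entry (ProgX.Base.Spec.heap_live_size.spec H n))
    (_h_heap_alloc : ∀ (H : Heap) (rest : List Obj) (frames : List (Nat × FrameLayout)), Calls Lay μ ProgX.Base.WayInv (ProgX.Base.conv u₀) ProgX.Base.L.heap_alloc.entry (ProgX.Base.Spec.heap_alloc.spec H rest frames))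
    (_h_malloc : ∀ (H : Heap) (rest : List Obj) (frames : List (Nat × FrameLayout)), Calls Lay μ ProgX.Base.WayInv (ProgX.Base.conv u₀) ProgX.Base.L.malloc.entry (ProgX.Base.Spec.malloc.spec H rest frames))
    (_h_memcpy : ∀ (others : List Obj) (frames : List (Nat × FrameLayout)), Calls Lay μ ProgX.Base.WayInv (ProgX.Base.conv u₀) ProgX.Base.L.memcpy.entry (ProgX.Base.Spec.memcpy.spec others frames))
    (_h_free : ∀ (H : Heap) (rest : List Obj) (frames : List (Nat × FrameLayout)) (n : Nat), Calls Lay μ ProgX.Base.WayInv (ProgX.Base.conv u₀) ProgX.Base.L.free.entry (ProgX.Base.Spec.free.spec H rest frames n))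
    (_h_arena_poison : Calls Lay μ ProgX.Base.WayInv (ProgX.Base.conv u₀) ProgX.Base.L.arena_poison.entry Asan.arenaPoisonSpec)
    (_h_arena_unpoison : Calls Lay μ ProgX.Base.WayInv (ProgX.Base.conv u₀) ProgX.Base.L.arena_unpoison.entry Asan.arenaUnpoisonSpec),
    ∀ (H : Heap) (rest : List Obj) (frames : List (Nat × FrameLayout)) (n c : Nat), Calls Lay μ ProgX.Base.WayInv (ProgX.Base.conv u₀) ProgX.Base.L.realloc.entry (ProgX.Base.Spec.realloc.spec H rest frames n c)

end ProgX.Base.Spec.realloc
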